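-- pv_equiv track=rewrite | github.com/JunseoMin/RoadToDiamond | Python3/프로그래머스/3/49191. 순위/순위.py | solution
-- ===== SOURCE A (Python) =====
-- from collections import deque,defaultdict
--
-- def solution(n, results):
--     answer = 0
--     wingraph  = defaultdict(list)
--     losegraph = defaultdict(list)
--
--     for win,lose in results:
--         wingraph[win].append(lose)
--         losegraph[lose].append(win)
--
--     for i in range(1,n+1):
--         Wqueue = deque([i])
--         Lqueue = deque([i])
--         winvisited = set()
--         losevisited = set()
--
--         while Wqueue:
--             curr = Wqueue.popleft()
--             if curr in winvisited:
--                 continue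
--             winvisited.add(curr)
--
--             for neighbor in wingraph[curr]:
--                 if neighbor not in winvisited:
--                     Wqueue.append(neighbor)
--
--         while Lqueue:
--             curr = Lqueue.popleft()
--             if curr in losevisited:
--                 continue
--             losevisited.add(curr)
--
--             for neighbor in losegraph[curr]:
--                 if neighbor not in losevisited:
--                     Lqueue.append(neighbor)
--
--         if len(winvisited.union(losevisited)) == n:
--             answer += 1
--     return answer
-- ===== SOURCE B (Python) =====
-- def solution(n, results):
--     # Global transitive closure (Floyd-Warshall over the pair set) instead of per-player double BFS.
--     edges = set(results)
--     nodes = {a for a, b in edges} | {b for a, b in edges}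
--     closure = set(edges)
--     for k in nodes:
--         preds = {a for (a, b) in closure if b == k}
--         succs = {c for (b, c) in closure if b == k}
--         closure |= {(a, c) for a in preds for c in succs}
--     answer = 0
--     for i in range(1, n + 1):
--         known = {j for (a, j) in closure if a == i} | {j for (j, a) in closure if a == i} | {i}
--         if len(known) == n:
--             answer += 1
--     return answer
-- ===== Notes on version B (the rewrite author's own statement) =====
-- stated objective: alternative
-- what changed: Replaces A's per-player pair of BFS traversals (a forward and a backward reachability search from every player) by one global Floyd-Warshall-style transitive closure of the result pairs, from which each player's determined relations are read off.
import Mathlib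
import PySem

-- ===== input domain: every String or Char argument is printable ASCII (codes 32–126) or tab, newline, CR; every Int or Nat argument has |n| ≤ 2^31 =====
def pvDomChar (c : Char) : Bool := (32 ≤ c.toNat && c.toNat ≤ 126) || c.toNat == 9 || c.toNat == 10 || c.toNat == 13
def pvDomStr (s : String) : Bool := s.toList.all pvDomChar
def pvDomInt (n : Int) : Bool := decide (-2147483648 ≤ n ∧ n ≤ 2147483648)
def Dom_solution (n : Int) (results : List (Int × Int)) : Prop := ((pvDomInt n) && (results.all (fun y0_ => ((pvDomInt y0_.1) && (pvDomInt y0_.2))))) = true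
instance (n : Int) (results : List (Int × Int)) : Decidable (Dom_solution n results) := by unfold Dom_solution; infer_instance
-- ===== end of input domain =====

-- ===== PORT A =====
-- B changes the algorithm (one global transitive closure instead of a double BFS per player); same value everywhere (objective: alternative).

-- used by bfsA's termination argument
theorem mem_flatten_values_of_mem_getD (adj : PySem.Dict Int (List Int)) (k x : Int)
    (h : x ∈ adj.getD k []) : x ∈ adj.values.flatten := by
  rcases hg : adj.get? k with _ | v
  · simp [PySem.Dict.getD_eq_get?_getD, hg] at h
  · have hi := PySem.Dict.mem_items_of_get?_eq_some (d := adj) hg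
    have hv : v ∈ adj.values := by
      simp only [PySem.Dict.values]
      exact List.mem_map.2 ⟨(k, v), hi, rfl⟩
    rw [PySem.Dict.getD_eq_get?_getD, hg] at h
    exact List.mem_flatten.2 ⟨v, hv, h⟩

-- the two identical Python BFS while-loops of A (queue, visited set)
def bfsA (adj : PySem.Dict Int (List Int)) (queue : List Int) (visited : PySem.Set Int) :
    PySem.Set Int :=
  match queue with
  | [] => visited
  | curr :: rest =>
    if curr ∈ visited then
      bfsA adj rest visited
    else
      let visited' := PySem.Set.add visited curr
      bfsA adj (rest ++ (adj.getD curr []).filter (fun nb => !(PySem.Set.contains visited' nb)))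
        visited'
termination_by (((adj.values.flatten.toFinset ∪ queue.toFinset) \ visited.toFinset).card, queue.length)
decreasing_by
  · apply Prod.Lex.right'
    · refine Finset.card_le_card (Finset.sdiff_subset_sdiff ?_ (subset_refl _))
      intro x hx; simp at hx ⊢; exact Or.inr hx
    · simp
  · apply Prod.Lex.left
    apply Finset.card_lt_card
    constructor
    · intro x hx
      simp only [Finset.mem_sdiff, Finset.mem_union, List.mem_toFinset, List.mem_append] at hx ⊢
      rcases hx with ⟨hx1, hx2⟩
      have hxv : ¬ x ∈ visited := by
        intro hxv; exact hx2 (by simp [PySem.Set.mem_add, hxv])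
      refine ⟨?_, hxv⟩
      rcases hx1 with h | h
      · exact Or.inl h
      · rcases h with h | h
        · exact Or.inr (by simp [h])
        · exact Or.inl (mem_flatten_values_of_mem_getD _ _ _ (List.mem_of_mem_filter h))
    · intro hsub
      have : curr ∈ (adj.values.flatten.toFinset ∪ (curr :: rest).toFinset) \ visited.toFinset := by
        simp_all
      have := hsub this
      simp [PySem.Set.mem_add] at this

def solution (n : Int) (results : List (Int × Int)) : Int :=
  let wingraph := results.foldl (fun d p => d.modify p.1 [] fun x => x ++ [p.2]) PySem.Dict.empty
  let losegraph := results.foldl (fun d p => d.modify p.2 [] fun x => x ++ [p.1]) PySem.Dict.empty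
  (PySem.List.pyRange 1 (n + 1) 1).foldl (fun answer i =>
    let winvisited := bfsA wingraph [i] []
    let losevisited := bfsA losegraph [i] []
    if PySem.Set.len (PySem.Set.union winvisited losevisited) = n then answer + 1 else answer) 0

-- ===== PORT B =====
-- one Floyd–Warshall round: add every pair (a, c) with (a, k), (k, c) already in the closure
def fwStep (C : PySem.Set (Int × Int)) (k : Int) : PySem.Set (Int × Int) :=
  let preds := PySem.Set.ofList ((C.filter (fun p => p.2 == k)).map (fun p => p.1))
  let succs := PySem.Set.ofList ((C.filter (fun p => p.1 == k)).map (fun p => p.2))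
  PySem.Set.update C (preds.flatMap (fun a => succs.map (fun c => (a, c))))

def solution_alt (n : Int) (results : List (Int × Int)) : Int :=
  let edges := PySem.Set.ofList results
  let nodes := PySem.Set.union (PySem.Set.ofList (edges.map (fun p => p.1)))
    (PySem.Set.ofList (edges.map (fun p => p.2)))
  let closure := nodes.foldl fwStep edges
  (PySem.List.pyRange 1 (n + 1) 1).foldl (fun answer i =>
    let known := PySem.Set.union (PySem.Set.union
        (PySem.Set.ofList ((closure.filter (fun p => p.1 == i)).map (fun p => p.2)))
        (PySem.Set.ofList ((closure.filter (fun p => p.2 == i)).map (fun p => p.1))))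
      (PySem.Set.ofList [i])
    if PySem.Set.len known = n then answer + 1 else answer) 0

-- ===== PRECONDITION & SPEC =====
def Spec_solution (n : Int) (results : List (Int × Int)) (out : Int) : Prop := out = solution_alt n results
instance (n : Int) (results : List (Int × Int)) (out : Int) : Decidable (Spec_solution n results out) := by unfold Spec_solution; infer_instance

-- ===== CLAIM (what is proved, stated in full; the proofs are below) =====
def Claim_equal_solution : Prop := ∀ (n : Int) (results : List (Int × Int)), Dom_solution n results → Spec_solution n results (solution n results)

-- ===== LEMMAS AND PROOFS =====

theorem bfsA_subset (adj : PySem.Dict Int (List Int)) (queue : List Int)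
    (visited : PySem.Set Int) :
    ∀ x, (x ∈ visited ∨ x ∈ queue) → x ∈ bfsA adj queue visited := by
  induction queue, visited using bfsA.induct adj with
  | case1 visited =>
    intro x hx; rw [bfsA]
    rcases hx with h | h
    · exact h
    · simp at h
  | case2 visited curr rest h ih =>
    intro x hx
    rw [bfsA, if_pos h]
    refine ih x ?_
    rcases hx with hx | hx
    · exact Or.inl hx
    · rcases List.mem_cons.1 hx with rfl | hx
      · exact Or.inl h
      · exact Or.inr hx
  | case3 visited curr rest h visited' ih =>
    intro x hx
    rw [bfsA, if_neg h]
    refine ih x ?_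
    rcases hx with hx | hx
    · exact Or.inl (by simp [visited', PySem.Set.mem_add, hx])
    · rcases List.mem_cons.1 hx with rfl | hx
      · exact Or.inl (by simp [visited', PySem.Set.mem_add])
      · exact Or.inr (List.mem_append_left _ hx)

theorem bfsA_nodup (adj : PySem.Dict Int (List Int)) (queue : List Int)
    (visited : PySem.Set Int) (hnd : visited.Nodup) :
    (bfsA adj queue visited).Nodup := by
  induction queue, visited using bfsA.induct adj with
  | case1 visited => simpa [bfsA] using hnd
  | case2 visited curr rest h ih => rw [bfsA, if_pos h]; exact ih hnd
  | case3 visited curr rest h visited' ih =>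
    rw [bfsA, if_neg h]
    exact ih (PySem.Set.nodup_add visited curr hnd)

theorem bfsA_sound (adj : PySem.Dict Int (List Int)) (R : Int → Prop)
    (hR : ∀ a b, R a → b ∈ adj.getD a [] → R b) (queue : List Int) (visited : PySem.Set Int) :
    (∀ v ∈ visited, R v) → (∀ q ∈ queue, R q) → ∀ x ∈ bfsA adj queue visited, R x := by
  induction queue, visited using bfsA.induct adj with
  | case1 visited =>
    intro hv _ x hx; exact hv x (by simpa [bfsA] using hx)
  | case2 visited curr rest h ih =>
    intro hv hq x hx
    rw [bfsA, if_pos h] at hx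
    exact ih hv (fun q hq' => hq q (List.mem_cons_of_mem _ hq')) x hx
  | case3 visited curr rest h visited' ih =>
    intro hv hq x hx
    rw [bfsA, if_neg h] at hx
    have hcurr : R curr := hq curr (List.mem_cons_self ..)
    refine ih ?_ ?_ x hx
    · intro v hv'
      rcases (PySem.Set.mem_add _ _ _).1 hv' with hv' | rfl
      · exact hv v hv'
      · exact hcurr
    · intro q hq'
      rcases List.mem_append.1 hq' with hq' | hq'
      · exact hq q (List.mem_cons_of_mem _ hq')
      · exact hR curr q hcurr (List.mem_of_mem_filter hq')

theorem bfsA_closed (adj : PySem.Dict Int (List Int)) (queue : List Int)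
    (visited : PySem.Set Int)
    (hcov : ∀ v ∈ visited, ∀ w ∈ adj.getD v [], w ∈ visited ∨ w ∈ queue) :
    ∀ v ∈ bfsA adj queue visited, ∀ w ∈ adj.getD v [], w ∈ bfsA adj queue visited := by
  induction queue, visited using bfsA.induct adj with
  | case1 visited =>
    intro v hv w hw
    simp only [bfsA] at hv ⊢
    rcases hcov v hv w hw with h | h
    · exact h
    · simp at h
  | case2 visited curr rest h ih =>
    rw [bfsA, if_pos h]
    refine ih ?_
    intro v hv w hw
    rcases hcov v hv w hw with h' | h'
    · exact Or.inl h'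
    · rcases List.mem_cons.1 h' with rfl | h'
      · exact Or.inl h
      · exact Or.inr h'
  | case3 visited curr rest h visited' ih =>
    rw [bfsA, if_neg h]
    refine ih ?_
    intro v hv w hw
    rcases (PySem.Set.mem_add _ _ _).1 hv with hv' | rfl
    · rcases hcov v hv' w hw with h' | h'
      · exact Or.inl (by simp [visited', PySem.Set.mem_add, h'])
      · rcases List.mem_cons.1 h' with rfl | h'
        · exact Or.inl (by simp [visited', PySem.Set.mem_add])
        · exact Or.inr (List.mem_append_left _ h')
    · by_cases hwv : w ∈ visited'
      · exact Or.inl hwv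
      · refine Or.inr (List.mem_append_right _ ?_)
        refine List.mem_filter.2 ⟨hw, ?_⟩
        simpa [PySem.Set.contains_iff] using hwv

theorem bfsA_mem_iff (adj : PySem.Dict Int (List Int)) (i : Int) :
    ∀ x, x ∈ bfsA adj [i] [] ↔ Relation.ReflTransGen (fun a b => b ∈ adj.getD a []) i x := by
  intro x
  constructor
  · refine fun hx => bfsA_sound adj (Relation.ReflTransGen (fun a b => b ∈ adj.getD a []) i)
      (fun a b ha hb => Relation.ReflTransGen.tail ha hb) [i] [] (by simp) ?_ x hx
    intro q hq
    rcases List.mem_singleton.1 hq with rfl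
    exact Relation.ReflTransGen.refl
  · intro hx
    induction hx with
    | refl => exact bfsA_subset adj [i] [] i (Or.inr (by simp))
    | tail hab hb ih =>
      exact bfsA_closed adj [i] [] (by simp) _ ih _ hb

-- membership in a defaultdict(list) adjacency built by a fold (both graphs via projections)
theorem mem_graphD (res : List (Int × Int)) (kf vf : (Int × Int) → Int) (a b : Int) :
    b ∈ (res.foldl (fun d p => d.modify (kf p) [] fun x => x ++ [vf p]) PySem.Dict.empty).getD a []
      ↔ ∃ p ∈ res, kf p = a ∧ vf p = b := by
  have h : res.foldl (fun d p => d.modify (kf p) [] fun x => x ++ [vf p]) PySem.Dict.empty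
      = (res.map (fun p => (kf p, vf p))).foldl (fun d p => d.modify p.1 [] fun x => x ++ [p.2])
          PySem.Dict.empty := by
    rw [List.foldl_map]
  rw [h, PySem.Dict.getD_foldl_modify_append, PySem.Dict.getD_empty]
  simp only [List.nil_append, List.mem_map, List.mem_filter]
  constructor
  · rintro ⟨q, ⟨⟨p, hp, rfl⟩, hk⟩, hv⟩
    exact ⟨p, hp, by simpa using hk, hv⟩
  · rintro ⟨p, hp, hk, hv⟩
    exact ⟨(kf p, vf p), ⟨⟨p, hp, rfl⟩, by simpa using hk⟩, hv⟩

theorem rtg_congr {r s : Int → Int → Prop} (h : ∀ a b, r a b ↔ s a b) {a b : Int} :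
    Relation.ReflTransGen r a b ↔ Relation.ReflTransGen s a b := by
  constructor <;> intro hh
  · induction hh with
    | refl => exact .refl
    | tail _ he ih => exact .tail ih ((h _ _).1 he)
  · induction hh with
    | refl => exact .refl
    | tail _ he ih => exact .tail ih ((h _ _).2 he)

-- paths whose intermediate vertices all lie in K
inductive PIn (res : List (Int × Int)) (K : List Int) : Int → Int → Prop
  | single {a b : Int} : (a, b) ∈ res → PIn res K a b
  | head {a x b : Int} : (a, x) ∈ res → x ∈ K → PIn res K x b → PIn res K a b

theorem PIn.mono {res : List (Int × Int)} {K K' : List Int} (hK : ∀ x ∈ K, x ∈ K')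
    {a b : Int} (h : PIn res K a b) : PIn res K' a b := by
  induction h with
  | single he => exact .single he
  | head he hx _ ih => exact .head he (hK _ hx) ih

theorem PIn.congr {res : List (Int × Int)} {K K' : List Int} (hK : ∀ x, x ∈ K ↔ x ∈ K')
    {a b : Int} : PIn res K a b ↔ PIn res K' a b :=
  ⟨fun h => h.mono (fun x hx => (hK x).1 hx), fun h => h.mono (fun x hx => (hK x).2 hx)⟩

theorem PIn.comp {res : List (Int × Int)} {K : List Int} {a k b : Int}
    (h1 : PIn res K a k) (h2 : PIn res K k b) : PIn res (k :: K) a b := by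
  induction h1 with
  | single he =>
    exact .head he (List.mem_cons_self ..) (h2.mono (fun x hx => List.mem_cons_of_mem _ hx))
  | head he hx _ ih => exact .head he (List.mem_cons_of_mem _ hx) (ih h2)

theorem PIn.cut {res : List (Int × Int)} {K : List Int} {k a b : Int}
    (h : PIn res (k :: K) a b) :
    PIn res K a b ∨ (PIn res K a k ∧ PIn res K k b) := by
  induction h with
  | single he => exact Or.inl (.single he)
  | head he hx _ ih =>
    rcases List.mem_cons.1 hx with rfl | hxK
    · refine Or.inr ⟨.single he, ?_⟩
      rcases ih with h' | ⟨_, h2⟩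
      · exact h'
      · exact h2
    · rcases ih with h' | ⟨h1, h2⟩
      · exact Or.inl (.head he hxK h')
      · exact Or.inr ⟨.head he hxK h1, h2⟩

theorem PIn.target {res : List (Int × Int)} {K : List Int} {a b : Int} (h : PIn res K a b) :
    ∃ y, (y, b) ∈ res := by
  induction h with
  | single he => exact ⟨_, he⟩
  | head _ _ _ ih => exact ih

theorem PIn.append {res : List (Int × Int)} {K : List Int} {a b c : Int}
    (h : PIn res K a b) (hb : b ∈ K) (he : (b, c) ∈ res) : PIn res K a c := by
  induction h with
  | single he' => exact .head he' hb (.single he)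
  | head he' hx _ ih => exact .head he' hx (ih hb he)

theorem PIn_iff_transGen {res : List (Int × Int)} {K : List Int}
    (hK : ∀ x, (∃ y, (y, x) ∈ res) → x ∈ K) {a b : Int} :
    PIn res K a b ↔ Relation.TransGen (fun x y => (x, y) ∈ res) a b := by
  constructor
  · intro h
    induction h with
    | single he => exact .single he
    | head he _ _ ih => exact .head he ih
  · intro h
    induction h with
    | single he => exact .single he
    | tail h' he ih => exact ih.append (hK _ ih.target) he

theorem mem_fwStep (C : PySem.Set (Int × Int)) (k : Int) (p : Int × Int) :
    p ∈ fwStep C k ↔ p ∈ C ∨ ((p.1, k) ∈ C ∧ (k, p.2) ∈ C) := by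
  unfold fwStep
  rw [PySem.Set.mem_update]
  refine or_congr_right ?_
  rw [List.mem_flatMap]
  constructor
  · rintro ⟨a, ha, hp⟩
    rcases List.mem_map.1 hp with ⟨c, hc, rfl⟩
    rw [PySem.Set.mem_ofList] at ha
    rcases List.mem_map.1 ha with ⟨q, hq, rfl⟩
    rcases List.mem_filter.1 hq with ⟨hqC, hq2⟩
    rw [PySem.Set.mem_ofList] at hc
    rcases List.mem_map.1 hc with ⟨r, hr, rfl⟩
    rcases List.mem_filter.1 hr with ⟨hrC, hr1⟩
    have hq2' : q.2 = k := by simpa using hq2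
    have hr1' : r.1 = k := by simpa using hr1
    constructor
    · have hq : ((q.1, k) : Int × Int) = q := by rw [← hq2']
      rw [hq]; exact hqC
    · have hr : ((k, r.2) : Int × Int) = r := by rw [← hr1']
      rw [hr]; exact hrC
  · rintro ⟨h1, h2⟩
    refine ⟨p.1, ?_, ?_⟩
    · rw [PySem.Set.mem_ofList]
      exact List.mem_map.2 ⟨(p.1, k), List.mem_filter.2 ⟨h1, by simp⟩, rfl⟩
    · refine List.mem_map.2 ⟨p.2, ?_, rfl⟩
      rw [PySem.Set.mem_ofList]
      exact List.mem_map.2 ⟨(k, p.2), List.mem_filter.2 ⟨h2, by simp⟩, rfl⟩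

theorem closure_fold (res : List (Int × Int)) :
    ∀ (ks : List Int) (C : PySem.Set (Int × Int)) (K : List Int), C.Nodup →
      (∀ p : Int × Int, p ∈ C ↔ PIn res K p.1 p.2) →
      (ks.foldl fwStep C).Nodup ∧
        ∀ p : Int × Int, p ∈ ks.foldl fwStep C ↔ PIn res (K ++ ks) p.1 p.2 := by
  intro ks
  induction ks with
  | nil =>
    intro C K hnd hinv
    refine ⟨hnd, fun p => ?_⟩
    rw [List.foldl_nil, List.append_nil]
    exact hinv p
  | cons k ks ih =>
    intro C K hnd hinv
    have hnd' : (fwStep C k).Nodup := by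
      unfold fwStep
      exact PySem.Set.nodup_update _ _ hnd
    have hinv' : ∀ p : Int × Int, p ∈ fwStep C k ↔ PIn res (K ++ [k]) p.1 p.2 := by
      intro p
      rw [mem_fwStep, hinv, hinv, hinv]
      rw [show PIn res (K ++ [k]) p.1 p.2 ↔ PIn res (k :: K) p.1 p.2 from
        PIn.congr (by intro x; simp; tauto)]
      constructor
      · rintro (h | ⟨h1, h2⟩)
        · exact h.mono (fun x hx => List.mem_cons_of_mem _ hx)
        · exact h1.comp h2
      · exact fun h => h.cut
    have := ih (fwStep C k) (K ++ [k]) hnd' hinv'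
    simpa [List.append_assoc] using this

-- the closure the B port computes holds exactly the strict-dominance pairs
theorem mem_closureB (results : List (Int × Int)) (p : Int × Int) :
    (p ∈ (PySem.Set.union (PySem.Set.ofList ((PySem.Set.ofList results).map (fun p => p.1)))
        (PySem.Set.ofList ((PySem.Set.ofList results).map (fun p => p.2)))).foldl fwStep
          (PySem.Set.ofList results)
      ↔ Relation.TransGen (fun x y => (x, y) ∈ results) p.1 p.2)
    ∧ ((PySem.Set.union (PySem.Set.ofList ((PySem.Set.ofList results).map (fun p => p.1)))
        (PySem.Set.ofList ((PySem.Set.ofList results).map (fun p => p.2)))).foldl fwStep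
          (PySem.Set.ofList results)).Nodup := by
  have hinit : ∀ p : Int × Int, p ∈ PySem.Set.ofList results ↔ PIn results [] p.1 p.2 := by
    intro p
    rw [PySem.Set.mem_ofList]
    constructor
    · exact fun h => .single h
    · intro h
      cases h with
      | single he => exact he
      | head _ hx _ => simp at hx
  obtain ⟨hnd, hmem⟩ := closure_fold results _ (PySem.Set.ofList results) []
    (PySem.Set.nodup_ofList _) hinit
  refine ⟨?_, hnd⟩
  rw [hmem p, List.nil_append]
  exact PIn_iff_transGen (by
    intro x hx
    rcases hx with ⟨y, hy⟩
    rw [PySem.Set.mem_union, PySem.Set.mem_ofList]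
    exact Or.inr ((PySem.Set.mem_ofList _ _).2 (List.mem_map.2 ⟨(y, x), (PySem.Set.mem_ofList _ _).2 hy, rfl⟩)))

-- A's per-player union and B's per-player `known` have the same members and are dup-free,
-- hence the same size, hence the same branch is taken for every i
theorem cond_eq (results : List (Int × Int)) (i : Int) :
    PySem.Set.len (PySem.Set.union
      (bfsA (results.foldl (fun d p => d.modify p.1 [] fun x => x ++ [p.2]) PySem.Dict.empty) [i] [])
      (bfsA (results.foldl (fun d p => d.modify p.2 [] fun x => x ++ [p.1]) PySem.Dict.empty) [i] []))
    = PySem.Set.len (PySem.Set.union (PySem.Set.union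
        (PySem.Set.ofList ((((PySem.Set.union
            (PySem.Set.ofList ((PySem.Set.ofList results).map (fun p => p.1)))
            (PySem.Set.ofList ((PySem.Set.ofList results).map (fun p => p.2)))).foldl fwStep
              (PySem.Set.ofList results)).filter (fun p => p.1 == i)).map (fun p => p.2)))
        (PySem.Set.ofList ((((PySem.Set.union
            (PySem.Set.ofList ((PySem.Set.ofList results).map (fun p => p.1)))
            (PySem.Set.ofList ((PySem.Set.ofList results).map (fun p => p.2)))).foldl fwStep
              (PySem.Set.ofList results)).filter (fun p => p.2 == i)).map (fun p => p.1))))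
      (PySem.Set.ofList [i])) := by
  set TG := Relation.TransGen (fun x y : Int => (x, y) ∈ results) with hTG
  have hcnd := (mem_closureB results (0, 0)).2
  have hcmem' := fun p => (mem_closureB results p).1
  -- A side membership
  have hwin : ∀ x, x ∈ bfsA (results.foldl (fun d p => d.modify p.1 [] fun x => x ++ [p.2])
      PySem.Dict.empty) [i] [] ↔ (x = i ∨ TG i x) := by
    intro x
    rw [bfsA_mem_iff]
    rw [rtg_congr (s := fun a b => (a, b) ∈ results) (by
      intro a b
      rw [mem_graphD results (fun p => p.1) (fun p => p.2)]
      constructor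
      · rintro ⟨p, hp, h1, h2⟩; rw [← h1, ← h2]; exact hp
      · exact fun h => ⟨(a, b), h, rfl, rfl⟩)]
    rw [Relation.reflTransGen_iff_eq_or_transGen]
  have hlose : ∀ x, x ∈ bfsA (results.foldl (fun d p => d.modify p.2 [] fun x => x ++ [p.1])
      PySem.Dict.empty) [i] [] ↔ (i = x ∨ TG x i) := by
    intro x
    rw [bfsA_mem_iff]
    rw [rtg_congr (s := Function.swap (fun a b => (a, b) ∈ results)) (by
      intro a b
      rw [mem_graphD results (fun p => p.2) (fun p => p.1)]
      constructor
      · rintro ⟨p, hp, h1, h2⟩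
        have : p = (b, a) := by
          cases p; simp at h1 h2 ⊢; exact ⟨h2, h1⟩
        rw [this] at hp; exact hp
      · exact fun h => ⟨(b, a), h, rfl, rfl⟩)]
    rw [Relation.reflTransGen_swap, Relation.reflTransGen_iff_eq_or_transGen]
  -- both sides are Nodup with the same membership, so they are a permutation
  have hperm : (PySem.Set.union
      (bfsA (results.foldl (fun d p => d.modify p.1 [] fun x => x ++ [p.2]) PySem.Dict.empty) [i] [])
      (bfsA (results.foldl (fun d p => d.modify p.2 [] fun x => x ++ [p.1]) PySem.Dict.empty) [i] [])).Perm
      (PySem.Set.union (PySem.Set.union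
        (PySem.Set.ofList ((((PySem.Set.union
            (PySem.Set.ofList ((PySem.Set.ofList results).map (fun p => p.1)))
            (PySem.Set.ofList ((PySem.Set.ofList results).map (fun p => p.2)))).foldl fwStep
              (PySem.Set.ofList results)).filter (fun p => p.1 == i)).map (fun p => p.2)))
        (PySem.Set.ofList ((((PySem.Set.union
            (PySem.Set.ofList ((PySem.Set.ofList results).map (fun p => p.1)))
            (PySem.Set.ofList ((PySem.Set.ofList results).map (fun p => p.2)))).foldl fwStep
              (PySem.Set.ofList results)).filter (fun p => p.2 == i)).map (fun p => p.1))))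
      (PySem.Set.ofList [i])) := by
    rw [List.perm_ext_iff_of_nodup]
    · intro x
      rw [PySem.Set.mem_union, hwin x, hlose x]
      rw [PySem.Set.mem_union, PySem.Set.mem_union, PySem.Set.mem_ofList, PySem.Set.mem_ofList,
        PySem.Set.mem_ofList]
      constructor
      · rintro ((rfl | h) | (rfl | h))
        · simp
        · exact Or.inl (Or.inl (List.mem_map.2 ⟨(i, x), List.mem_filter.2
            ⟨(hcmem' (i, x)).2 h, by simp⟩, rfl⟩))
        · simp
        · exact Or.inl (Or.inr (List.mem_map.2 ⟨(x, i), List.mem_filter.2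
            ⟨(hcmem' (x, i)).2 h, by simp⟩, rfl⟩))
      · rintro ((h | h) | h)
        · rcases List.mem_map.1 h with ⟨q, hq, rfl⟩
          rcases List.mem_filter.1 hq with ⟨hqC, hq1⟩
          have := (hcmem' q).1 hqC
          rw [show q.1 = i by simpa using hq1] at this
          exact Or.inl (Or.inr this)
        · rcases List.mem_map.1 h with ⟨q, hq, rfl⟩
          rcases List.mem_filter.1 hq with ⟨hqC, hq2⟩
          have := (hcmem' q).1 hqC
          rw [show q.2 = i by simpa using hq2] at this
          exact Or.inr (Or.inr this)
        · rcases List.mem_singleton.1 h with rfl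
          exact Or.inl (Or.inl rfl)
    · exact PySem.Set.nodup_union _ _ (bfsA_nodup _ _ _ List.nodup_nil)
    · exact PySem.Set.nodup_union _ _ (PySem.Set.nodup_union _ _ (PySem.Set.nodup_ofList _))
  unfold PySem.Set.len
  exact congrArg (fun m : Nat => (m : Int)) hperm.length_eq

-- ===== VERDICT (by name: the statement is the Claim_ definition above) =====
theorem solution_spec : Claim_equal_solution := by
  unfold Claim_equal_solution Spec_solution
  intro n results _
  unfold solution solution_alt
  refine PySem.List.foldl_congr_mem _ _ _ _ ?_
  intro acc i _
  simp only [cond_eq results i]
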